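-- pv_equiv track=rewrite | github.com/skylerseeg/fieldbridge | backend/app/services/predictive_maintenance/failure_predict.py | _group_work_orders
-- ===== SOURCE A (Python) =====
-- from collections import defaultdict
-- from typing import Iterable
--
-- def _group_work_orders(work_orders: Iterable[dict]) -> dict[str, list[dict]]:
--     """Group emwo rows by Equipment, sorted newest-first by OpenDate."""
--     grouped: dict[str, list[dict]] = defaultdict(list)
--     for wo in work_orders:
--         eq = _coalesce_str(wo.get("Equipment"))
--         if eq:
--             grouped[eq].append(wo)
--     for eq, rows in grouped.items():
--         rows.sort(key=lambda r: r.get("OpenDate") or "", reverse=True)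
--     return grouped
--
-- def _coalesce_str(v, default: str = "") -> str:
--     if v is None:
--         return default
--     s = str(v).strip()
--     return s if s else default
-- ===== SOURCE B (Python) =====
-- from collections import defaultdict
--
--
-- def _coalesce_str(v, default: str = "") -> str:
--     if v is None:
--         return default
--     s = str(v).strip()
--     return s if s else default
--
--
-- def _group_work_orders(work_orders):
--     """Group emwo rows by Equipment, keeping each group newest-first by
--     inserting every row at its place as it arrives (no sort call)."""
--     grouped = defaultdict(list)
--     for wo in work_orders:
--         eq = _coalesce_str(wo.get("Equipment"))
--         if not eq:
--             continue
--         rows = grouped[eq]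
--         k = wo.get("OpenDate") or ""
--         i = 0
--         while i < len(rows) and not ((rows[i].get("OpenDate") or "") < k):
--             i += 1
--         rows.insert(i, wo)
--     return grouped
-- ===== Notes on version B (the rewrite author's own statement) =====
-- stated objective: alternative
-- what changed: B builds each group in one pass by inserting every row at its newest-first position as it arrives (online stable insertion into the group's list), instead of A's group-everything-then-sort-each-group; the per-group sort call disappears.
import Mathlib
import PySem

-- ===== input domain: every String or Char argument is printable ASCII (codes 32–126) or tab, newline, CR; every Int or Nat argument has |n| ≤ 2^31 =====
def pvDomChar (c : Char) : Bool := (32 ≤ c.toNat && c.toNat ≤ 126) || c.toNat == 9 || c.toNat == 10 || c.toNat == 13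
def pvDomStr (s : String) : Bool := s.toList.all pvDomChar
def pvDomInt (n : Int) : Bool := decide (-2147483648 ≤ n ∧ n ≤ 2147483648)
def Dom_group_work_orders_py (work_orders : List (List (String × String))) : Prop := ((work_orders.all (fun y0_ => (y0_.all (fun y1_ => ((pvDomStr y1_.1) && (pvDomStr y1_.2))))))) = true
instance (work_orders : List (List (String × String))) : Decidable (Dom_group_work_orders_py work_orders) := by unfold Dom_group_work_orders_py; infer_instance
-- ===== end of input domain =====

-- B groups in ONE pass, inserting each row at its newest-first position in its group
-- as it arrives (online insertion) instead of grouping and then sorting every group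
-- (objective: alternative). A mutates nothing observable; equivalence is about the
-- returned dict (as an association list in key-insertion order).

-- ===== PORT A =====

-- _coalesce_str(v) with the default "" (shared helper of both Pythons)
def pvCoalesce (v : Option String) : String :=
  match v with
  | none => ""
  | some s0 =>
    let s := PySem.Str.strip s0
    if s ≠ "" then s else ""

-- r.get("OpenDate") or ""   (the sort key; textually identical in both Pythons)
def pvDate (r : List (String × String)) : String :=
  match (PySem.Dict.ofList r).get? "OpenDate" with
  | none => ""
  | some s => if s ≠ "" then s else ""

def group_work_orders_py (work_orders : List (List (String × String))) : List (String × List (List (String × String))) :=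
  let grouped : PySem.Dict String (List (List (String × String))) :=
    work_orders.foldl (fun g wo =>
      let eq := pvCoalesce ((PySem.Dict.ofList wo).get? "Equipment")
      if eq ≠ "" then g.modify eq [] (fun rows => rows ++ [wo]) else g)
      PySem.Dict.empty
  -- for eq, rows in grouped.items(): rows.sort(key=..., reverse=True)
  grouped.items.map (fun p => (p.1, PySem.List.sorted p.2 pvDate true))

-- ===== PORT B =====

-- the while-loop of Source B: scan to the first row whose date is strictly older than k,
-- insert wo there (so wo goes after all rows with date ≥ k — stable newest-first)
def pvInsertNewest (k : String) (wo : List (String × String)) :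
    List (List (String × String)) → List (List (String × String))
  | [] => [wo]
  | r :: rest => if pvDate r < k then wo :: r :: rest else r :: pvInsertNewest k wo rest

def group_work_orders_py_alt (work_orders : List (List (String × String))) : List (String × List (List (String × String))) :=
  (work_orders.foldl (fun g wo =>
      let eq := pvCoalesce ((PySem.Dict.ofList wo).get? "Equipment")
      if eq ≠ "" then g.modify eq [] (fun rows => pvInsertNewest (pvDate wo) wo rows) else g)
      (PySem.Dict.empty : PySem.Dict String (List (List (String × String))))).items

-- ===== PRECONDITION & SPEC =====
def Spec_group_work_orders_py (work_orders : List (List (String × String))) (out : List (String × List (List (String × String)))) : Prop := out = group_work_orders_py_alt work_orders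
instance (work_orders : List (List (String × String))) (out : List (String × List (List (String × String)))) : Decidable (Spec_group_work_orders_py work_orders out) := by unfold Spec_group_work_orders_py; infer_instance

-- ===== CLAIM (what is proved, stated in full; the proofs are below) =====
def Claim_equal_group_work_orders_py : Prop := ∀ (work_orders : List (List (String × String))), Dom_group_work_orders_py work_orders → Spec_group_work_orders_py work_orders (group_work_orders_py work_orders)

-- ===== LEMMAS AND PROOFS =====

-- value map: a group's stored rows, sorted newest-first
def pvSortRows (v : List (List (String × String))) : List (List (String × String)) :=
  PySem.List.sorted v pvDate true

-- a dict with every group replaced by its sorted form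
def pvMapD (g : PySem.Dict String (List (List (String × String)))) :
    PySem.Dict String (List (List (String × String))) :=
  PySem.Dict.mk (g.items.map (fun p => (p.1, pvSortRows p.2)))

-- the loop bodies of the two ports (zeta-reduced, definitionally equal to them)
def pvStepA (g : PySem.Dict String (List (List (String × String))))
    (wo : List (String × String)) : PySem.Dict String (List (List (String × String))) :=
  if pvCoalesce ((PySem.Dict.ofList wo).get? "Equipment") ≠ "" then
    g.modify (pvCoalesce ((PySem.Dict.ofList wo).get? "Equipment")) [] (fun rows => rows ++ [wo])
  else g

def pvStepB (g : PySem.Dict String (List (List (String × String))))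
    (wo : List (String × String)) : PySem.Dict String (List (List (String × String))) :=
  if pvCoalesce ((PySem.Dict.ofList wo).get? "Equipment") ≠ "" then
    g.modify (pvCoalesce ((PySem.Dict.ofList wo).get? "Equipment")) []
      (fun rows => pvInsertNewest (pvDate wo) wo rows)
  else g

lemma pvInsertNewest_eq_insertBy (wo : List (String × String)) :
    ∀ rows, pvInsertNewest (pvDate wo) wo rows
      = PySem.List.insertBy (fun a b => decide (pvDate b < pvDate a)) wo rows := by
  intro rows
  induction rows with
  | nil => rfl
  | cons r rest ih =>
    simp only [pvInsertNewest, PySem.List.insertBy]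
    by_cases h : pvDate r < pvDate wo <;> simp [h, ih]

lemma pvSortRows_snoc (v : List (List (String × String))) (wo : List (String × String)) :
    pvSortRows (v ++ [wo])
      = PySem.List.insertBy (fun a b => decide (pvDate b < pvDate a)) wo (pvSortRows v) := by
  simp [pvSortRows, PySem.List.sorted, List.foldl_append]

lemma pvMapD_get? (g : PySem.Dict String (List (List (String × String)))) (k : String) :
    (pvMapD g).get? k = (g.get? k).map pvSortRows := by
  simp only [pvMapD, PySem.Dict.get?]
  induction g.items with
  | nil => rfl
  | cons p rest ih =>
    by_cases h : p.1 == k <;> simp [List.find?, h, Function.comp_def]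

lemma pvMapD_contains (g : PySem.Dict String (List (List (String × String)))) (k : String) :
    (pvMapD g).contains k = g.contains k := by
  simp [pvMapD, PySem.Dict.contains, List.any_map, Function.comp_def]

lemma pvMapD_insert (g : PySem.Dict String (List (List (String × String)))) (k : String)
    (v : List (List (String × String))) :
    (pvMapD g).insert k (pvSortRows v) = pvMapD (g.insert k v) := by
  simp only [PySem.Dict.insert, pvMapD_contains]
  by_cases h : g.contains k
  · simp only [h, if_true, pvMapD, List.map_map]
    congr 1
    apply List.map_congr_left
    intro p _
    by_cases hp : p.1 = k <;> simp [hp]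
  · simp [h, pvMapD]

lemma pvMapD_getD (g : PySem.Dict String (List (List (String × String)))) (k : String) :
    (pvMapD g).getD k [] = pvSortRows (g.getD k []) := by
  simp only [PySem.Dict.getD, pvMapD_get?]
  cases g.get? k <;> rfl

lemma pvStep (g : PySem.Dict String (List (List (String × String))))
    (wo : List (String × String)) : pvStepB (pvMapD g) wo = pvMapD (pvStepA g wo) := by
  unfold pvStepA pvStepB
  by_cases h : pvCoalesce ((PySem.Dict.ofList wo).get? "Equipment") ≠ ""
  · simp only [if_pos h, PySem.Dict.modify, pvMapD_getD, pvInsertNewest_eq_insertBy,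
      ← pvSortRows_snoc, pvMapD_insert]
  · simp only [if_neg h]

lemma pvFold (l : List (List (String × String))) :
    ∀ g, l.foldl pvStepB (pvMapD g) = pvMapD (l.foldl pvStepA g) := by
  induction l with
  | nil => intro g; rfl
  | cons wo rest ih =>
    intro g
    simp only [List.foldl_cons]
    rw [pvStep g wo]
    exact ih _

-- ===== VERDICT (by name: the statement is the Claim_ definition above) =====
theorem group_work_orders_py_spec : Claim_equal_group_work_orders_py := by
  intro work_orders _
  show group_work_orders_py work_orders = group_work_orders_py_alt work_orders
  have h := pvFold work_orders PySem.Dict.empty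
  have hemp : pvMapD PySem.Dict.empty = PySem.Dict.empty := rfl
  rw [hemp] at h
  show (work_orders.foldl pvStepA PySem.Dict.empty).items.map (fun p => (p.1, pvSortRows p.2))
      = (work_orders.foldl pvStepB PySem.Dict.empty).items
  rw [h]
  rfl
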